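-- pv_equiv track=rewrite | github.com/NREL/REopt_API | reo/validators.py | warning_message
-- ===== SOURCE A (Python) =====
-- def warning_message(warnings):
--     """
--     Convert a list of lists into a dictionary
--     :param warnings: list - item 1 argument, item 2 location
--     :return: message - 'Scenario>Site: latitude and longitude'
--     """
--     output = {}
--     for arg, path in warnings:
--         path = ">".join(path)
--         if path not in output:
--             output[path] = arg
--         else:
--             output[path] += ' AND ' + arg
--     return output
-- ===== SOURCE B (Python) =====
-- def warning_message(warnings):
--     """
--     Convert a list of lists into a dictionary
--     :param warnings: list - item 1 argument, item 2 location
--     :return: message - 'Scenario>Site: latitude and longitude'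
--     """
--     keyed = [(">".join(path), arg) for arg, path in warnings]
--     return {k: " AND ".join(a for kk, a in keyed if kk == k)
--             for k in dict.fromkeys(k for k, _ in keyed)}
-- ===== Notes on version B (the rewrite author's own statement) =====
-- stated objective: alternative
-- what changed: B does no incremental accumulation at all: it precomputes the keyed list, dedups the keys in first-occurrence order with dict.fromkeys, and for each distinct key re-scans the whole list to join its args, trading A's one-pass dict building for nested scans over an immutable list.
import Mathlib
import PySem

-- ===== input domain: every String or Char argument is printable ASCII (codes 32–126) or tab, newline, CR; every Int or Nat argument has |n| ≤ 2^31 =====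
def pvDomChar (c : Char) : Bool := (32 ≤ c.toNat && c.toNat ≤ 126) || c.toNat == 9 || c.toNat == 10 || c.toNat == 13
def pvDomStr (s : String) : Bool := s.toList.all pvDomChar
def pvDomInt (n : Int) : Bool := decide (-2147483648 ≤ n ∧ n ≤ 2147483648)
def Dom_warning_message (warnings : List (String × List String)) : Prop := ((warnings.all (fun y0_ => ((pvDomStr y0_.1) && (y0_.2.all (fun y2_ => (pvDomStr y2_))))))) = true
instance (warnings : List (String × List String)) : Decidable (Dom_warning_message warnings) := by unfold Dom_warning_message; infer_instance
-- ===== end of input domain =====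

-- B replaces A's one-pass dict accumulation by a keyed list, an ordered key dedup, and a per-key
-- re-scan join (alternative decomposition; same result, nested scans instead of incremental grouping).


-- ===== PORT A =====
-- for arg, path in warnings: path = ">".join(path); if path not in output: output[path] = arg
-- else: output[path] += ' AND ' + arg   (returned dict → association list of its items)
def warning_message (warnings : List (String × List String)) : List (String × String) :=
  (warnings.foldl
    (fun output p =>
      let path := PySem.Str.join ">" p.2
      if output.contains path = false then output.insert path p.1
      else output.modify path "" (fun s => s ++ " AND " ++ p.1))
    PySem.Dict.empty).items

-- ===== PORT B =====
-- keyed = [(">".join(path), arg) …]; {k: " AND ".join(a for kk, a in keyed if kk == k)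
--                                     for k in dict.fromkeys(k for k, _ in keyed)}
def warning_message_alt (warnings : List (String × List String)) : List (String × String) :=
  let keyed := warnings.map (fun p => (PySem.Str.join ">" p.2, p.1))
  (PySem.List.dedup (keyed.map Prod.fst)).map
    (fun k => (k, PySem.Str.join " AND " ((keyed.filter (fun q => q.1 == k)).map Prod.snd)))

-- ===== PRECONDITION & SPEC =====
def Spec_warning_message (warnings : List (String × List String)) (out : List (String × String)) : Prop := out = warning_message_alt warnings
instance (warnings : List (String × List String)) (out : List (String × String)) : Decidable (Spec_warning_message warnings out) := by unfold Spec_warning_message; infer_instance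

-- ===== CLAIM (what is proved, stated in full; the proofs are below) =====
def Claim_equal_warning_message : Prop := ∀ (warnings : List (String × List String)), Dom_warning_message warnings → Spec_warning_message warnings (warning_message warnings)

-- ===== LEMMAS AND PROOFS =====

theorem pvChars_join_append (sep : List Char) (l : List (List Char)) (a : List Char)
    (h : l ≠ []) :
    PySem.Chars.join sep (l ++ [a]) = PySem.Chars.join sep l ++ sep ++ a := by
  induction l with
  | nil => exact absurd rfl h
  | cons x xs ih =>
    cases xs with
    | nil => simp [PySem.Chars.join, List.intercalate]
    | cons y ys =>
      have hstep : ∀ (t : List (List Char)),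
          sep.intercalate (x :: y :: t) = x ++ sep ++ sep.intercalate (y :: t) := by
        intro t; simp [List.intercalate, List.flatten, List.append_assoc]
      have hih := ih (by simp)
      simp only [PySem.Chars.join] at hih ⊢
      rw [List.cons_append, List.cons_append, hstep, hstep, ← List.cons_append, hih]
      simp [List.append_assoc]

theorem pvJoin_singleton (a : String) : PySem.Str.join " AND " [a] = a := by
  simp [PySem.Str.join, PySem.Chars.join, List.intercalate]

theorem pvJoin_append (vs : List String) (a : String) (h : vs ≠ []) :
    PySem.Str.join " AND " (vs ++ [a]) = PySem.Str.join " AND " vs ++ " AND " ++ a := by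
  apply String.toList_inj.mp
  have h' : vs.map String.toList ≠ [] := by simpa using h
  simp [PySem.Str.join, pvChars_join_append _ _ _ h']

-- B's result, as a function of the keyed list (the body of warning_message_alt)
def pvGather (kp : List (String × String)) : List (String × String) :=
  (PySem.List.dedup (kp.map Prod.fst)).map
    (fun k => (k, PySem.Str.join " AND " ((kp.filter (fun q => q.1 == k)).map Prod.snd)))

theorem pvGather_keys (kp : List (String × String)) :
    (pvGather kp).map Prod.fst = PySem.List.dedup (kp.map Prod.fst) := by
  simp [pvGather, List.map_map, Function.comp_def]

-- the invariant: A's dict after the whole loop has exactly B's items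
theorem pvLoop_items (ws : List (String × List String)) :
    (ws.foldl
      (fun output p =>
        let path := PySem.Str.join ">" p.2
        if output.contains path = false then output.insert path p.1
        else output.modify path "" (fun s => s ++ " AND " ++ p.1))
      PySem.Dict.empty).items
    = pvGather (ws.map (fun p => (PySem.Str.join ">" p.2, p.1))) := by
  induction ws using List.reverseRecOn with
  | nil => rfl
  | append_singleton ws w ih =>
    rw [List.foldl_append]
    set d := (ws.foldl
      (fun output p =>
        let path := PySem.Str.join ">" p.2
        if output.contains path = false then output.insert path p.1
        else output.modify path "" (fun s => s ++ " AND " ++ p.1))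
      PySem.Dict.empty) with hd
    set kp := ws.map (fun p => (PySem.Str.join ">" p.2, p.1)) with hkp
    set k := PySem.Str.join ">" w.2 with hk
    have hkeys : d.items.map Prod.fst = PySem.List.dedup (kp.map Prod.fst) := by
      rw [ih, pvGather_keys]
    have hcont : d.contains k = decide (k ∈ kp.map Prod.fst) := by
      have hm : (k ∈ List.map Prod.fst kp) ↔ k ∈ List.map Prod.fst d.items := by
        rw [hkeys]; exact (PySem.List.mem_dedup _ _).symm
      show (d.items.any fun p => p.1 == k) = _
      rw [Bool.eq_iff_iff]
      simp [List.any_eq_true, List.mem_map, hm]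
    rw [List.map_append, List.map_cons, List.map_nil]
    simp only [List.foldl_cons, List.foldl_nil]
    rw [← hk, ← hkp]
    by_cases hmem : k ∈ kp.map Prod.fst
    · -- existing key: A rewrites the entry in place, B's filter for k gains one element
      have hc : d.contains k = true := by rw [hcont]; simpa using hmem
      have hfilter_ne : kp.filter (fun q => q.1 == k) ≠ [] := by
        obtain ⟨q, hq, hq1⟩ := List.mem_map.mp hmem
        intro hnil
        have : q ∈ kp.filter (fun q => q.1 == k) := List.mem_filter.mpr ⟨hq, by simp [hq1]⟩
        simp [hnil] at this
      have hnodup : d.keys.Nodup := by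
        show (d.items.map (fun p => p.1)).Nodup
        have : (d.items.map (fun p => p.1)) = d.items.map Prod.fst := rfl
        rw [this, hkeys]; exact PySem.List.nodup_dedup _
      have hmemi : (k, PySem.Str.join " AND "
          ((kp.filter (fun q => q.1 == k)).map Prod.snd)) ∈ d.items := by
        rw [ih, pvGather]
        exact List.mem_map.mpr ⟨k, by simpa [PySem.List.mem_dedup] using hmem, rfl⟩
      have hgetD : d.getD k "" = PySem.Str.join " AND "
          ((kp.filter (fun q => q.1 == k)).map Prod.snd) :=
        PySem.Dict.getD_of_mem_items _ hmemi hnodup ""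
      simp only [hc, Bool.true_eq_false, if_false]
      rw [PySem.Dict.modify, hgetD, PySem.Dict.items_insert_of_contains _ _ hc, ih]
      -- both sides are maps over the same dedup list (k is already in it)
      have hded : PySem.List.dedup ((kp ++ [(k, w.1)]).map Prod.fst)
          = PySem.List.dedup (kp.map Prod.fst) := by
        simp only [List.map_append, List.map_cons, List.map_nil,
          PySem.List.dedup_eq_ofList, PySem.Set.ofList_append_singleton]
        exact PySem.Set.add_of_mem (by simpa [PySem.Set.mem_ofList] using hmem)
      rw [pvGather, pvGather, hded, List.map_map]
      refine List.map_congr_left ?_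
      intro k' hk'
      by_cases hke : k' = k
      · subst hke
        have hsplit : (kp ++ [(k, w.1)]).filter (fun q => q.1 == k)
            = kp.filter (fun q => q.1 == k) ++ [(k, w.1)] := by
          simp [List.filter_append]
        rw [hsplit, List.map_append, List.map_cons, List.map_nil,
          pvJoin_append _ _ (by simpa using hfilter_ne)]
        simp
      · have hsame : (kp ++ [(k, w.1)]).filter (fun q => q.1 == k')
            = kp.filter (fun q => q.1 == k') := by
          simp [List.filter_append]
          intro h; exact absurd h.symm hke
        rw [hsame]
        simp [hke]
    · -- fresh key: A appends a new entry, B's dedup list gains k at the end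
      have hc : d.contains k = false := by rw [hcont]; simpa using hmem
      simp only [hc, if_true]
      rw [PySem.Dict.items_insert_of_not_contains _ _ hc, ih]
      have hded : PySem.List.dedup ((kp ++ [(k, w.1)]).map Prod.fst)
          = PySem.List.dedup (kp.map Prod.fst) ++ [k] := by
        simp only [List.map_append, List.map_cons, List.map_nil,
          PySem.List.dedup_eq_ofList, PySem.Set.ofList_append_singleton]
        exact PySem.Set.add_of_not_mem (by simpa [PySem.Set.mem_ofList] using hmem)
      rw [pvGather, pvGather, hded, List.map_append, List.map_cons, List.map_nil]
      congr 1
      · refine List.map_congr_left ?_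
        intro k' hk'
        have hk'mem : k' ∈ kp.map Prod.fst := by
          simpa [PySem.List.mem_dedup] using hk'
        have hke : k' ≠ k := fun h => hmem (h ▸ hk'mem)
        have hsame : (kp ++ [(k, w.1)]).filter (fun q => q.1 == k')
            = kp.filter (fun q => q.1 == k') := by
          simp [List.filter_append]
          intro h; exact absurd h.symm hke
        rw [hsame]
      · have hfilter0 : kp.filter (fun q => q.1 == k) = [] := by
          rw [List.filter_eq_nil_iff]
          intro q hq hq1
          exact hmem (List.mem_map.mpr ⟨q, hq, by simpa using hq1⟩)
        have : (kp ++ [(k, w.1)]).filter (fun q => q.1 == k) = [(k, w.1)] := by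
          simp [List.filter_append, hfilter0]
        simp [this, pvJoin_singleton]

-- ===== VERDICT (by name: the statement is the Claim_ definition above) =====
theorem warning_message_spec : Claim_equal_warning_message := by
  intro ws _
  unfold Spec_warning_message warning_message warning_message_alt
  exact pvLoop_items ws
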